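-- pv_equiv track=rewrite | github.com/lulumengyi/Sensitive-field-identification | sensitive-field-identification-master-ebdae1a9c2d7042188bd1f3a474d289a662656cc/sensitive_field_identification/pre_processing/nl_handler.py | split_num
-- ===== SOURCE A (Python) =====
-- def split_num(text: str, num_to_digits: bool = True) -> list:
--     """ 分割数字
--
--     Args:
--         text: 待处理文本
--         num_to_digits: 是否将数字拆分成单个数字
--
--     Returns:
--
--     """
--
--     tokens = list()
--
--     text_buffer = ''
--     last_char_type = ''
--
--     for char in text:
--         if char in '0123456789':
--             current_char_type = 'DIGIT'
--         else:
--             current_char_type = 'OTHERS'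
--
--         if current_char_type != last_char_type or \
--                 num_to_digits and current_char_type == 'DIGIT':
--             if text_buffer != '':
--                 tokens.append(text_buffer)
--             text_buffer = char
--         else:
--             text_buffer = text_buffer + char
--
--         last_char_type = current_char_type
--
--     if text_buffer != '':
--         tokens.append(text_buffer)
--
--     return tokens
-- ===== SOURCE B (Python) =====
-- DIGITS = '0123456789'
--
--
-- def split_num(text: str, num_to_digits: bool = True) -> list:
--     """Run-scanner re-implementation: scan maximal runs with an index pointer
--     and slice, instead of a per-char buffer/state machine."""
--     tokens = []
--     i = 0
--     n = len(text)
--     while i < n: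
--         if text[i] in DIGITS:
--             if num_to_digits:
--                 tokens.append(text[i])
--                 i += 1
--             else:
--                 j = i
--                 while j < n and text[j] in DIGITS:
--                     j += 1
--                 tokens.append(text[i:j])
--                 i = j
--         else:
--             j = i
--             while j < n and text[j] not in DIGITS:
--                 j += 1
--             tokens.append(text[i:j])
--             i = j
--     return tokens
-- ===== Notes on version B (the rewrite author's own statement) =====
-- stated objective: alternative
-- what changed: Replaced A's per-character buffer/last-type state machine with an index-based run scanner that finds each maximal digit or non-digit run and slices it out (emitting single characters for digits when num_to_digits).
import Mathlib
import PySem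

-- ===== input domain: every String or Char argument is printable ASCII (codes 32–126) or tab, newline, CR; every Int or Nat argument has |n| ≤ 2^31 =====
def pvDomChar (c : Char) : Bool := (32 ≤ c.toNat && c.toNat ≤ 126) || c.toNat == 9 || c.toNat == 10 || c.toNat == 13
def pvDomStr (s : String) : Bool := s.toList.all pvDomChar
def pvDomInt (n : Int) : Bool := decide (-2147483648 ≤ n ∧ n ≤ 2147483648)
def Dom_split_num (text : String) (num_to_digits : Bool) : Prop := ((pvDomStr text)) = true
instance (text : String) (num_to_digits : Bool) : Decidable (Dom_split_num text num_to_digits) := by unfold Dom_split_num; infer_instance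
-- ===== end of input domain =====

-- B is an index-based maximal-run scanner instead of A's per-char buffer/state machine; same cost, different structure.

-- shared character classifier: Python's `char in '0123456789'`
def pvIsDig (c : Char) : Bool := ['0','1','2','3','4','5','6','7','8','9'].contains c

-- ===== PORT A =====
-- one iteration of A's for-loop; state = (tokens, text_buffer, last_char_type)
def splitNumStep (num_to_digits : Bool) (st : List String × List Char × String) (c : Char) :
    List String × List Char × String :=
  let cur := if pvIsDig c then "DIGIT" else "OTHERS"
  if cur ≠ st.2.2 ∨ (num_to_digits = true ∧ cur = "DIGIT") then
    ((if st.2.1 ≠ [] then st.1 ++ [String.mk st.2.1] else st.1), [c], cur)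
  else
    (st.1, st.2.1 ++ [c], cur)

def split_num (text : String) (num_to_digits : Bool) : List String :=
  let st := text.toList.foldl (splitNumStep num_to_digits) ([], [], "")
  if st.2.1 ≠ [] then st.1 ++ [String.mk st.2.1] else st.1

-- ===== PORT B =====
-- B's while-loop with index i: each step consumes one maximal run (the inner
-- `while j` scans are `takeWhile`/`dropWhile` of the remaining characters).
def splitNumRuns (num_to_digits : Bool) : List Char → List String
  | [] => []
  | c :: rest =>
    if pvIsDig c then
      if num_to_digits then
        String.mk [c] :: splitNumRuns num_to_digits rest
      else
        String.mk ((c :: rest).takeWhile pvIsDig) ::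
          splitNumRuns num_to_digits ((c :: rest).dropWhile pvIsDig)
    else
      String.mk ((c :: rest).takeWhile (fun x => ¬ pvIsDig x)) ::
        splitNumRuns num_to_digits ((c :: rest).dropWhile (fun x => ¬ pvIsDig x))
  termination_by l => l.length
  decreasing_by
  · simp
  · simp_all [List.dropWhile]
    exact List.length_dropWhile_le _ _
  · simp_all [List.dropWhile]
    exact List.length_dropWhile_le _ _

def split_num_alt (text : String) (num_to_digits : Bool) : List String :=
  splitNumRuns num_to_digits text.toList

-- ===== PRECONDITION & SPEC =====
def Spec_split_num (text : String) (num_to_digits : Bool) (out : List String) : Prop := out = split_num_alt text num_to_digits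
instance (text : String) (num_to_digits : Bool) (out : List String) : Decidable (Spec_split_num text num_to_digits out) := by unfold Spec_split_num; infer_instance

-- ===== CLAIM (what is proved, stated in full; the proofs are below) =====
def Claim_equal_split_num : Prop := ∀ (text : String) (num_to_digits : Bool), Dom_split_num text num_to_digits → Spec_split_num text num_to_digits (split_num text num_to_digits)

-- ===== LEMMAS AND PROOFS =====

-- A's tail: finish the fold from an arbitrary state
def finishA (ntd : Bool) (st : List String × List Char × String) (l : List Char) : List String :=
  let st' := l.foldl (splitNumStep ntd) st
  if st'.2.1 ≠ [] then st'.1 ++ [String.mk st'.2.1] else st'.1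

theorem finishA_eq (text : String) (ntd : Bool) :
    split_num text ntd = finishA ntd ([], [], "") text.toList := rfl

-- combined invariant for the three mid-run states of A's machine
theorem main_inv (ntd : Bool) (l : List Char) : ∀ (toks : List String) (buf : List Char), buf ≠ [] →
    (finishA ntd (toks, buf, "OTHERS") l =
      toks ++ String.mk (buf ++ l.takeWhile (fun x => ¬ pvIsDig x)) ::
        splitNumRuns ntd (l.dropWhile (fun x => ¬ pvIsDig x)))
  ∧ (ntd = true →
      finishA ntd (toks, buf, "DIGIT") l = toks ++ String.mk buf :: splitNumRuns ntd l)
  ∧ (ntd = false →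
      finishA ntd (toks, buf, "DIGIT") l =
        toks ++ String.mk (buf ++ l.takeWhile pvIsDig) ::
          splitNumRuns ntd (l.dropWhile pvIsDig)) := by
  induction l with
  | nil =>
    intro toks buf hb
    refine ⟨?_, ?_, ?_⟩ <;> simp [finishA, splitNumRuns, hb]
  | cons c rest ih =>
    intro toks buf hb
    by_cases hd : pvIsDig c
    · -- c is a digit
      refine ⟨?_, ?_, ?_⟩
      · -- from OTHERS state: type changes, flush
        have h1 : finishA ntd (toks, buf, "OTHERS") (c :: rest) =
            finishA ntd (toks ++ [String.mk buf], [c], "DIGIT") rest := by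
          simp [finishA, List.foldl, splitNumStep, hd, hb]
        rcases Bool.eq_false_or_eq_true ntd with hn | hn
        · subst hn
          have := (ih (toks ++ [String.mk buf]) [c] (by simp)).2.1 rfl
          rw [h1, this]
          simp [List.takeWhile, List.dropWhile, hd, splitNumRuns]
        · subst hn
          have := (ih (toks ++ [String.mk buf]) [c] (by simp)).2.2 rfl
          rw [h1, this]
          simp [List.takeWhile, List.dropWhile, hd, splitNumRuns]
      · -- from DIGIT state, ntd = true: flush anyway
        intro hn; subst hn
        have h1 : finishA true (toks, buf, "DIGIT") (c :: rest) =
            finishA true (toks ++ [String.mk buf], [c], "DIGIT") rest := by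
          simp [finishA, List.foldl, splitNumStep, hd, hb]
        have := (ih (toks ++ [String.mk buf]) [c] (by simp)).2.1 rfl
        rw [h1, this]
        simp [splitNumRuns, hd]
      · -- from DIGIT state, ntd = false: extend buffer
        intro hn; subst hn
        have h1 : finishA false (toks, buf, "DIGIT") (c :: rest) =
            finishA false (toks, buf ++ [c], "DIGIT") rest := by
          simp [finishA, List.foldl, splitNumStep, hd]
        have := (ih toks (buf ++ [c]) (by simp)).2.2 rfl
        rw [h1, this]
        simp [List.takeWhile, List.dropWhile, hd]
    · -- c is not a digit
      refine ⟨?_, ?_, ?_⟩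
      · -- from OTHERS state: extend buffer
        have h1 : finishA ntd (toks, buf, "OTHERS") (c :: rest) =
            finishA ntd (toks, buf ++ [c], "OTHERS") rest := by
          simp [finishA, List.foldl, splitNumStep, hd]
        have := (ih toks (buf ++ [c]) (by simp)).1
        rw [h1, this]
        simp [List.takeWhile, List.dropWhile, hd]
      · -- from DIGIT state, ntd = true: type changes, flush
        intro hn; subst hn
        have h1 : finishA true (toks, buf, "DIGIT") (c :: rest) =
            finishA true (toks ++ [String.mk buf], [c], "OTHERS") rest := by
          simp [finishA, List.foldl, splitNumStep, hd, hb]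
        have := (ih (toks ++ [String.mk buf]) [c] (by simp)).1
        rw [h1, this]
        simp [splitNumRuns, List.takeWhile, List.dropWhile, hd]
      · -- from DIGIT state, ntd = false: type changes, flush
        intro hn; subst hn
        have h1 : finishA false (toks, buf, "DIGIT") (c :: rest) =
            finishA false (toks ++ [String.mk buf], [c], "OTHERS") rest := by
          simp [finishA, List.foldl, splitNumStep, hd, hb]
        have := (ih (toks ++ [String.mk buf]) [c] (by simp)).1
        rw [h1, this]
        simp [splitNumRuns, List.takeWhile, List.dropWhile, hd]

theorem split_num_eq_alt (text : String) (ntd : Bool) :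
    split_num text ntd = split_num_alt text ntd := by
  rw [finishA_eq]
  unfold split_num_alt
  cases hl : text.toList with
  | nil => simp [finishA, splitNumRuns]
  | cons c rest =>
    by_cases hd : pvIsDig c
    · have h1 : finishA ntd ([], [], "") (c :: rest) =
          finishA ntd ([], [c], "DIGIT") rest := by
        simp [finishA, List.foldl, splitNumStep, hd]
      rcases Bool.eq_false_or_eq_true ntd with hn | hn
      · subst hn
        have := (main_inv true rest [] [c] (by simp)).2.1 rfl
        rw [h1, this]
        simp [splitNumRuns, hd]
      · subst hn
        have := (main_inv false rest [] [c] (by simp)).2.2 rfl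
        rw [h1, this]
        simp [splitNumRuns, List.takeWhile, List.dropWhile, hd]
    · have h1 : finishA ntd ([], [], "") (c :: rest) =
          finishA ntd ([], [c], "OTHERS") rest := by
        simp [finishA, List.foldl, splitNumStep, hd]
      have := (main_inv ntd rest [] [c] (by simp)).1
      rw [h1, this]
      simp [splitNumRuns, List.takeWhile, List.dropWhile, hd]

-- ===== VERDICT (by name: the statement is the Claim_ definition above) =====
theorem split_num_spec : Claim_equal_split_num := by
  intro text ntd _
  unfold Spec_split_num
  exact split_num_eq_alt text ntd
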